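-- pv_equiv track=rewrite | github.com/0xab01/SubHunt | main.py | categorize_results
-- ===== SOURCE A (Python) =====
-- def categorize_results(results):
--     status_200_301_302 = []
--     status_403 = []
--     status_error = []
--
--     for url, status in results:
--         if status in [200, 301, 302]:
--             status_200_301_302.append(url)
--         elif status == 403:
--             status_403.append(url)
--         else:
--             status_error.append(url)
--
--     return status_200_301_302, status_403, status_error
-- ===== SOURCE B (Python) =====
-- def categorize_results(results):
--     rows = list(results)
--     good = [url for url, status in rows if status in (200, 301, 302)]
--     forbidden = [url for url, status in rows if status == 403]
--     error = [url for url, status in rows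
--              if status not in (200, 301, 302) and status != 403]
--     return good, forbidden, error
-- ===== Notes on version B (the rewrite author's own statement) =====
-- stated objective: idiomatic
-- what changed: Replaces the single-pass loop with three mutable accumulators by three independent list-comprehension filtering passes over the materialized rows.
import Mathlib
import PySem

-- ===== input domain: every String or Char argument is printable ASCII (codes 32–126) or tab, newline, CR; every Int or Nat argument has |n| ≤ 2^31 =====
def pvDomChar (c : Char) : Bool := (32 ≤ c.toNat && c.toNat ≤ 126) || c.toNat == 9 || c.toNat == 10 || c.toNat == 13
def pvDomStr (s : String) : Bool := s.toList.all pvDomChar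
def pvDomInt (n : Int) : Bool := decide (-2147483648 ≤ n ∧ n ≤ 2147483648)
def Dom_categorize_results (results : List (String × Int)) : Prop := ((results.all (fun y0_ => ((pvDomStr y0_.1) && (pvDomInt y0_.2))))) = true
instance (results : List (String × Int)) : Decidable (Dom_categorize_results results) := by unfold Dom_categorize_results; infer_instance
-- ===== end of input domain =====

-- B replaces the single if/elif/else pass with three independent list-comprehension filtering passes (idiomatic decomposition; same O(n) cost).
-- ===== PORT A =====
-- single pass with three accumulators, as A's loop
def categorizeLoop (results : List (String × Int))
    (g f e : List String) : List String × List String × List String :=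
  match results with
  | [] => (g, f, e)
  | (url, status) :: rest =>
    if status ∈ [200, 301, 302] then categorizeLoop rest (g ++ [url]) f e
    else if status == 403 then categorizeLoop rest g (f ++ [url]) e
    else categorizeLoop rest g f (e ++ [url])

def categorize_results (results : List (String × Int)) : List String × List String × List String :=
  categorizeLoop results [] [] []

-- ===== PORT B =====
-- three independent filtering passes (list comprehensions in Source B)
def categorize_results_alt (results : List (String × Int)) : List String × List String × List String :=
  ((results.filter (fun r => r.2 ∈ [(200:Int), 301, 302])).map Prod.fst,
   (results.filter (fun r => r.2 == 403)).map Prod.fst,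
   (results.filter (fun r => r.2 ∉ [(200:Int), 301, 302] && r.2 != 403)).map Prod.fst)

-- ===== PRECONDITION & SPEC =====
def Spec_categorize_results (results : List (String × Int)) (out : List String × List String × List String) : Prop := out = categorize_results_alt results
instance (results : List (String × Int)) (out : List String × List String × List String) : Decidable (Spec_categorize_results results out) := by unfold Spec_categorize_results; infer_instance

-- ===== CLAIM (what is proved, stated in full; the proofs are below) =====
def Claim_equal_categorize_results : Prop := ∀ (results : List (String × Int)), Dom_categorize_results results → Spec_categorize_results results (categorize_results results)

-- ===== LEMMAS AND PROOFS =====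

-- ===== VERDICT (by name: the statement is the Claim_ definition above) =====
theorem categorizeLoop_eq (results : List (String × Int)) (g f e : List String) :
    categorizeLoop results g f e =
      (g ++ (results.filter (fun r => r.2 ∈ [(200:Int), 301, 302])).map Prod.fst,
       f ++ (results.filter (fun r => r.2 == 403)).map Prod.fst,
       e ++ (results.filter (fun r => r.2 ∉ [(200:Int), 301, 302] && r.2 != 403)).map Prod.fst) := by
  induction results generalizing g f e with
  | nil => simp [categorizeLoop]
  | cons hd tl ih =>
    obtain ⟨url, status⟩ := hd
    by_cases h1 : status ∈ [(200:Int), 301, 302]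
    · have h2 : status ≠ 403 := by rintro rfl; simp at h1
      have hb : (status == 403) = false := by simp [h2]
      simp [categorizeLoop, h1, ih, List.filter, hb]
    · by_cases h2 : status = 403
      · subst h2; simp [categorizeLoop, ih, List.filter]
      · have hb : (status == 403) = false := by simp [h2]
        have hb2 : (status != 403) = true := by simp [bne, hb]
        simp [categorizeLoop, h1, ih, List.filter, hb, hb2]

theorem categorize_results_spec : Claim_equal_categorize_results := by
  intro results _
  unfold Spec_categorize_results categorize_results categorize_results_alt
  simp [categorizeLoop_eq]
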